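-- pv_equiv track=rewrite | github.com/RTBHOUSE/ocp-lisbon-2024-sonic-materials | config-repo/builder/frr.py | prettify_frr
-- ===== SOURCE A (Python) =====
-- def prettify_frr(cfg):
--     output = []
--     tabs = 0
--     for line in cfg.split('\n'):
--         line = line.strip()
--         if len(line) == 0:
--             continue
--
--         for tag in ['exit']:
--             if line.startswith(tag):
--                 tabs -= 1
--                 break
--         output.append('  ' * tabs + line)
--         for tag in ['router', 'address-family', 'route-map']:
--             if line.startswith(tag):
--                 tabs += 1
--                 break
--
--     return '\n'.join(output)
-- ===== SOURCE B (Python) =====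
-- def prettify_frr(cfg):
--     kept = [s for s in (ln.strip() for ln in cfg.split('\n')) if s]
--     closers = [s.startswith('exit') for s in kept]
--     deltas = [int(s.startswith(('router', 'address-family', 'route-map'))) - int(c)
--               for s, c in zip(kept, closers)]
--     prefixes = []
--     acc = 0
--     for d in deltas:
--         prefixes.append(acc)
--         acc += d
--     indents = [p - int(c) for p, c in zip(prefixes, closers)]
--     return '\n'.join('  ' * i + s for i, s in zip(indents, kept))
-- ===== Notes on version B (the rewrite author's own statement) =====
-- stated objective: alternative
-- what changed: A's single stateful loop (running tabs counter with inner tag loops, appending as it goes) is replaced by a multi-pass pipeline: filter stripped non-empty lines, classify each as opener/closer, take an exclusive prefix sum of the signed deltas, then format and join in a final zip pass.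
import Mathlib
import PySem

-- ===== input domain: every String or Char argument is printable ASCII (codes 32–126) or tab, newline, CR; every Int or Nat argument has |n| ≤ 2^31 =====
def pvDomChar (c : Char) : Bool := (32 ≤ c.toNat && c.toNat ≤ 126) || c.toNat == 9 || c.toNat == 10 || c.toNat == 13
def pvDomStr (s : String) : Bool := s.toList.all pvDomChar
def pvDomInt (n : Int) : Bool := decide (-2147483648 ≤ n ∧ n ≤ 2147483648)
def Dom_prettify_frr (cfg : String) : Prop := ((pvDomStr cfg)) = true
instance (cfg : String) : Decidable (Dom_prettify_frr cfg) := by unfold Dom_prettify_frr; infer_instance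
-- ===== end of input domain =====

-- B replaces A's single stateful loop by a filter + classification + prefix-sum + format pipeline (alternative decomposition, same cost).

-- '  ' * n in Python (negative n gives ""); exact via PySem.List.pyRepeat, shared by both ports
def pvSp (n : Int) : String := String.ofList (PySem.List.pyRepeat "  ".toList n)

-- ===== PORT A =====
def pvStepA (st : List String × Int) (line0 : String) : List String × Int :=
  let line := PySem.Str.strip line0
  if PySem.Str.len line = 0 then st
  else
    let tabs1 := if PySem.Str.startswith line "exit" then st.2 - 1 else st.2
    let out1 := st.1 ++ [pvSp tabs1 ++ line]
    let tabs2 := if PySem.Str.startswith line "router" || PySem.Str.startswith line "address-family"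
                    || PySem.Str.startswith line "route-map" then tabs1 + 1 else tabs1
    (out1, tabs2)

def prettify_frr (cfg : String) : String :=
  PySem.Str.join "\n" (((PySem.Str.split? cfg "\n").getD []).foldl pvStepA (([] : List String), (0 : Int))).1

-- ===== PORT B =====
def prettify_frr_alt (cfg : String) : String :=
  let kept := (((PySem.Str.split? cfg "\n").getD []).map PySem.Str.strip).filter (fun s => s ≠ "")
  let closers := kept.map (fun s => PySem.Str.startswith s "exit")
  let deltas := List.zipWith
    (fun s c => (if PySem.Str.startswith s "router" || PySem.Str.startswith s "address-family"
                    || PySem.Str.startswith s "route-map" then (1 : Int) else 0)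
                - (if c then (1 : Int) else 0)) kept closers
  let prefixes := (deltas.foldl (fun (pa : List Int × Int) d => (pa.1 ++ [pa.2], pa.2 + d))
                    (([] : List Int), (0 : Int))).1
  let indents := List.zipWith (fun p c => p - (if c then (1 : Int) else 0)) prefixes closers
  PySem.Str.join "\n" (List.zipWith (fun i s => pvSp i ++ s) indents kept)

-- ===== PRECONDITION & SPEC =====
def Spec_prettify_frr (cfg : String) (out : String) : Prop := out = prettify_frr_alt cfg
instance (cfg : String) (out : String) : Decidable (Spec_prettify_frr cfg out) := by unfold Spec_prettify_frr; infer_instance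

-- ===== CLAIM (what is proved, stated in full; the proofs are below) =====
def Claim_equal_prettify_frr : Prop := ∀ (cfg : String), Dom_prettify_frr cfg → Spec_prettify_frr cfg (prettify_frr cfg)

-- ===== LEMMAS AND PROOFS =====

def pvCls (s : String) : Int := if PySem.Str.startswith s "exit" then 1 else 0
def pvOpn (s : String) : Int :=
  if PySem.Str.startswith s "router" || PySem.Str.startswith s "address-family"
     || PySem.Str.startswith s "route-map" then 1 else 0

-- the common per-kept-line output, threaded by the running indent t
def pvBody : List String → Int → List String
  | [], _ => []
  | s :: ls, t => (pvSp (t - pvCls s) ++ s) :: pvBody ls (t + (pvOpn s - pvCls s))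

def pvScan : List Int → Int → List Int
  | [], _ => []
  | d :: ds, a => a :: pvScan ds (a + d)

theorem pvScan_foldl (ds : List Int) : ∀ (ps : List Int) (a : Int),
    (ds.foldl (fun (pa : List Int × Int) d => (pa.1 ++ [pa.2], pa.2 + d)) (ps, a)).1
      = ps ++ pvScan ds a := by
  induction ds with
  | nil => intro ps a; simp [pvScan]
  | cons d ds ih => intro ps a; simp [pvScan, ih]

theorem pvB_chain (ks : List String) : ∀ (t : Int),
    List.zipWith (fun i s => pvSp i ++ s)
      (List.zipWith (fun p c => p - (if c then (1 : Int) else 0))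
        (pvScan (List.zipWith
          (fun s c => (if PySem.Str.startswith s "router" || PySem.Str.startswith s "address-family"
                          || PySem.Str.startswith s "route-map" then (1 : Int) else 0)
                      - (if c then (1 : Int) else 0)) ks (ks.map (fun s => PySem.Str.startswith s "exit"))) t)
        (ks.map (fun s => PySem.Str.startswith s "exit"))) ks
      = pvBody ks t := by
  induction ks with
  | nil => intro t; simp [pvBody]
  | cons s ls ih =>
    intro t
    by_cases hc : PySem.Str.startswith s "exit" = true <;>
      by_cases ho : (PySem.Str.startswith s "router" || PySem.Str.startswith s "address-family"
          || PySem.Str.startswith s "route-map") = true <;>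
      simp only [List.map_cons, List.zipWith_cons_cons, pvScan, pvBody, pvCls, pvOpn, hc, ho,
        if_true, if_false, Bool.false_eq_true, ih]

theorem pv_len_ne (s : String) (h : s ≠ "") : ¬ PySem.Str.len s = 0 := by
  simp [PySem.Str.len_eq]
  exact fun hc => h (by cases s; simp_all)

theorem pvA_fold (lines : List String) : ∀ (out : List String) (t : Int),
    (lines.foldl pvStepA (out, t)).1
      = out ++ pvBody ((lines.map PySem.Str.strip).filter (fun s => s ≠ "")) t := by
  induction lines with
  | nil => intro out t; simp [pvBody]
  | cons l ls ih =>
    intro out t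
    by_cases h : PySem.Str.strip l = ""
    · simp [pvStepA, h, PySem.Str.len_eq, ih]
    · have hl := pv_len_ne _ h
      by_cases hc : PySem.Str.startswith (PySem.Str.strip l) "exit" = true <;>
        by_cases ho : (PySem.Str.startswith (PySem.Str.strip l) "router"
            || PySem.Str.startswith (PySem.Str.strip l) "address-family"
            || PySem.Str.startswith (PySem.Str.strip l) "route-map") = true <;>
        simp only [List.foldl_cons, pvStepA, hl, if_false, if_true, List.map_cons,
          List.filter_cons, h, ne_eq, not_false_eq_true, decide_true, ih, pvBody,
          pvCls, pvOpn, hc, ho, Bool.false_eq_true, List.append_assoc,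
          List.singleton_append] <;>
        first
          | rfl
          | ring_nf

-- ===== VERDICT (by name: the statement is the Claim_ definition above) =====
theorem prettify_frr_spec : Claim_equal_prettify_frr := by
  intro cfg _
  unfold Spec_prettify_frr prettify_frr prettify_frr_alt
  simp only [pvA_fold, pvScan_foldl, pvB_chain, List.nil_append]
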